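-- pv_equiv track=rewrite | github.com/michaelroycummings/spanish_verbs | eda_util.py | check_for_punctuation_whitespace
-- ===== SOURCE A (Python) =====
-- import string
--
-- def check_for_punctuation_whitespace(lst):
--     dirty_verbs = []
--     for verb in lst:
--         for char in verb:
--             if char in string.punctuation or char in string.whitespace:
--                 dirty_verbs.append(verb)
--                 break
--     return dirty_verbs
-- ===== SOURCE B (Python) =====
-- import string
--
-- _DELETE_BAD = str.maketrans('', '', string.punctuation + string.whitespace)
--
-- def check_for_punctuation_whitespace(lst):
--     # A verb is dirty iff deleting all punctuation/whitespace shortens it.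
--     return [verb for verb in lst if len(verb.translate(_DELETE_BAD)) != len(verb)]
-- ===== Notes on version B (the rewrite author's own statement) =====
-- stated objective: alternative
-- what changed: Instead of A's nested character loop that short-circuits on the first bad character, B deletes all punctuation/whitespace characters from each verb with a str.translate deletion table and keeps the verb iff the translated string is shorter; no explicit character loop or early exit remains.
import Mathlib
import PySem

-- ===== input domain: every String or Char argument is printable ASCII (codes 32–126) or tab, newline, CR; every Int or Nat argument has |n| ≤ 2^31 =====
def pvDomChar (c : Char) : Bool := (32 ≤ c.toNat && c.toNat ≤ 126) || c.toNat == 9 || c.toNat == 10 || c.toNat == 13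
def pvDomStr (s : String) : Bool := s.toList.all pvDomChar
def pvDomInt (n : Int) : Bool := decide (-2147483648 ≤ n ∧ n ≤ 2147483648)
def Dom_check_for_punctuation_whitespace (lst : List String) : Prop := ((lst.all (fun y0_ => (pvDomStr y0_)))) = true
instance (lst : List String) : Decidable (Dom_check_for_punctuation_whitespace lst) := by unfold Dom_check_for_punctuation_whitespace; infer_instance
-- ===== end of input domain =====

-- B replaces A's nested character loop with break by a translate-style deletion:
-- it filters the bad characters out of each verb and keeps the verb iff the
-- deletion shortened it (alternative decomposition, same cost).


-- ===== PORT A =====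
-- string.punctuation and string.whitespace (\x0b = VT, \x0c = FF written via Char.ofNat)
def pyPunctuation : List Char := "!\"#$%&'()*+,-./:;<=>?@[\\]^_`{|}~".toList
def pyWhitespace : List Char := [' ', '\t', '\n', '\r', Char.ofNat 11, Char.ofNat 12]

-- inner 'for char in verb: … break' loop of A: returns true iff the break fired
def pwInnerA : List Char → Bool
  | [] => false
  | c :: rest =>
    if pyPunctuation.contains c || pyWhitespace.contains c then true
    else pwInnerA rest

def check_for_punctuation_whitespace (lst : List String) : List String :=
  lst.foldl (fun dirty_verbs verb =>
    if pwInnerA verb.toList then dirty_verbs ++ [verb] else dirty_verbs) []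

-- ===== PORT B =====
-- _DELETE_BAD = str.maketrans('', '', string.punctuation + string.whitespace);
-- verb.translate(_DELETE_BAD) deletes every bad character, i.e. keeps the others
def pwBad : List Char := pyPunctuation ++ pyWhitespace

def pwTranslateDelete (cs : List Char) : List Char :=
  cs.filter (fun c => !(pwBad.contains c))

-- [verb for verb in lst if len(verb.translate(_DELETE_BAD)) != len(verb)]
def check_for_punctuation_whitespace_alt (lst : List String) : List String :=
  lst.filter (fun verb =>
    decide ((pwTranslateDelete verb.toList).length ≠ verb.toList.length))

-- ===== PRECONDITION & SPEC =====
def Spec_check_for_punctuation_whitespace (lst : List String) (out : List String) : Prop := out = check_for_punctuation_whitespace_alt lst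
instance (lst : List String) (out : List String) : Decidable (Spec_check_for_punctuation_whitespace lst out) := by unfold Spec_check_for_punctuation_whitespace; infer_instance

-- ===== CLAIM (what is proved, stated in full; the proofs are below) =====
def Claim_equal_check_for_punctuation_whitespace : Prop := ∀ (lst : List String), Dom_check_for_punctuation_whitespace lst → Spec_check_for_punctuation_whitespace lst (check_for_punctuation_whitespace lst)

-- ===== LEMMAS AND PROOFS =====

-- A's break loop fires exactly when deleting the bad characters shortens the list
theorem pwInnerA_eq_shortens (cs : List Char) :
    pwInnerA cs = decide ((pwTranslateDelete cs).length ≠ cs.length) := by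
  induction cs with
  | nil => rfl
  | cons c rest ih =>
    have hle : (pwTranslateDelete rest).length ≤ rest.length :=
      List.length_filter_le _ _
    by_cases h : (pyPunctuation.contains c || pyWhitespace.contains c) = true
    · have hc : pwBad.contains c = true := by
        rcases Bool.or_eq_true_iff.mp h with h' | h'
        · exact List.contains_iff_mem.mpr
            (List.mem_append_left _ (List.contains_iff_mem.mp h'))
        · exact List.contains_iff_mem.mpr
            (List.mem_append_right _ (List.contains_iff_mem.mp h'))
      rw [show pwInnerA (c :: rest) = true from by rw [pwInnerA]; exact if_pos h]
      symm
      rw [decide_eq_true_iff]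
      simp only [pwTranslateDelete, List.filter_cons, hc, Bool.not_true,
        if_neg Bool.false_ne_true, List.length_cons]
      have : (rest.filter (fun c => !(pwBad.contains c))).length ≤ rest.length :=
        List.length_filter_le _ _
      omega
    · have hc : pwBad.contains c = false := by
        rw [Bool.eq_false_iff]
        intro hm
        rcases List.mem_append.mp (List.contains_iff_mem.mp hm) with h' | h'
        · exact h (Bool.or_eq_true_iff.mpr (Or.inl (List.contains_iff_mem.mpr h')))
        · exact h (Bool.or_eq_true_iff.mpr (Or.inr (List.contains_iff_mem.mpr h')))
      rw [show pwInnerA (c :: rest) = pwInnerA rest from by rw [pwInnerA]; exact if_neg h, ih]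
      simp only [pwTranslateDelete, List.filter_cons, hc, Bool.not_false,
        if_pos trivial, List.length_cons, decide_eq_decide]
      constructor <;> intro hx <;> omega

-- ===== VERDICT (by name: the statement is the Claim_ definition above) =====
theorem check_for_punctuation_whitespace_spec : Claim_equal_check_for_punctuation_whitespace := by
  intro lst _
  unfold Spec_check_for_punctuation_whitespace check_for_punctuation_whitespace check_for_punctuation_whitespace_alt
  have := PySem.List.foldl_append_if
    (fun verb : String => pwInnerA verb.toList) (fun v : String => v) lst []
  simp only [this, List.nil_append, List.map_id']
  congr 1
  funext v
  exact pwInnerA_eq_shortens v.toList
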